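-- pv_equiv track=rewrite | github.com/hajihosseini/FC04051_Class | S26/EX_Exam1/exam.py | q6_reverse_prime_positions
-- ===== SOURCE A (Python) =====
-- def isPrime(n):
--     if n<2:
--         return False
--     for i in range(2,n):
--         if n%i==0:
--             return False
--     return True
--
-- def q6_reverse_prime_positions(lst):
--     reverseindex = []
--     for i in range(len(lst)):
--         if isPrime(i):
--             reverseindex.append(i)
--     for i in range(len(reverseindex)//2):
--         temp = lst[reverseindex[i]]
--         lst[reverseindex[i]] = lst[reverseindex[len(reverseindex)-i-1]]
--         lst[reverseindex[len(reverseindex)-i-1]] = temp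
--     return lst
-- ===== SOURCE B (Python) =====
-- def _is_prime(n):
--     if n < 2:
--         return False
--     i = 2
--     while i * i <= n:
--         if n % i == 0:
--             return False
--         i += 1
--     return True
--
-- def q6_reverse_prime_positions(lst):
--     primes = [i for i in range(len(lst)) if _is_prime(i)]
--     rev = [lst[p] for p in primes][::-1]
--     for p, v in zip(primes, rev):
--         lst[p] = v
--     return lst
-- ===== Notes on version B (the rewrite author's own statement) =====
-- stated objective: faster
-- what changed: Replaces A's O(i) trial division per index plus an in-place pairwise swap loop by a sqrt-bounded primality test and a gather-reverse-scatter of the values at prime indices.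
import Mathlib
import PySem

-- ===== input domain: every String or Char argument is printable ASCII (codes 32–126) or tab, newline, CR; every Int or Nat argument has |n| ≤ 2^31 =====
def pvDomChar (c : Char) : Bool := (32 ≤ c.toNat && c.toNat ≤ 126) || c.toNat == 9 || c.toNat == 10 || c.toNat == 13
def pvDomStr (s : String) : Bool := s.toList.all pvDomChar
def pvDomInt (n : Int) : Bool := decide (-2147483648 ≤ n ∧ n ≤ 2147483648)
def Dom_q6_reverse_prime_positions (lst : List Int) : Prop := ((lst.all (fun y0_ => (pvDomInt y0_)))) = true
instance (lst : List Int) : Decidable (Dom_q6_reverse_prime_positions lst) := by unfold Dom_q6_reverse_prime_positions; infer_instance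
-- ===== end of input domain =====

-- B replaces A's per-index trial division over range(2,i) and its in-place pairwise swap
-- loop by a sqrt-bounded primality test and a gather-reverse-scatter of the prime-index
-- values (objective: faster). In Python both A and B mutate lst in place; the final
-- contents agree, and the theorem is about the returned list.


-- ===== PORT A =====
-- isPrime: trial division over range(2, n) with early return False (early return ↦ all)
def pvIsPrimeA (n : Nat) : Bool :=
  if n < 2 then false
  else (List.range' 2 (n - 2)).all (fun i => !(n % i == 0))

def q6_reverse_prime_positions (lst : List Int) : List Int :=
  -- first loop: reverseindex.append(i) for prime i in range(len(lst))
  let reverseindex : List Nat :=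
    (List.range lst.length).foldl (fun acc i => if pvIsPrimeA i then acc ++ [i] else acc) []
  let k := reverseindex.length
  -- second loop: swap lst[reverseindex[i]] and lst[reverseindex[k-i-1]];
  -- all indexing is in range by construction, so getD is exact here
  (List.range (k / 2)).foldl (fun l i =>
    let p := reverseindex.getD i 0
    let q := reverseindex.getD (k - i - 1) 0
    let temp := l.getD p 0
    let l1 := l.set p (l.getD q 0)
    l1.set q temp) lst

-- ===== PORT B =====
-- the `while i*i <= n` loop of Source B's _is_prime
def pvTrialB (n i : Nat) : Bool :=
  if i * i ≤ n then
    (if n % i == 0 then false else pvTrialB n (i + 1))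
  else true
  termination_by n + 1 - i
  decreasing_by
    rcases Nat.eq_zero_or_pos i with h0 | h0
    · omega
    · have : i ≤ i * i := Nat.le_mul_of_pos_left i h0
      omega

def pvIsPrimeB (n : Nat) : Bool :=
  if n < 2 then false else pvTrialB n 2

def q6_reverse_prime_positions_alt (lst : List Int) : List Int :=
  let primes : List Nat := (List.range lst.length).filter pvIsPrimeB
  let rev : List Int := (primes.map (fun p => lst.getD p 0)).reverse
  -- for p, v in zip(primes, rev): lst[p] = v   (indices in range by construction)
  (primes.zip rev).foldl (fun l pv => l.set pv.1 pv.2) lst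

-- ===== PRECONDITION & SPEC =====
def Spec_q6_reverse_prime_positions (lst : List Int) (out : List Int) : Prop := out = q6_reverse_prime_positions_alt lst
instance (lst : List Int) (out : List Int) : Decidable (Spec_q6_reverse_prime_positions lst out) := by unfold Spec_q6_reverse_prime_positions; infer_instance

-- ===== CLAIM (what is proved, stated in full; the proofs are below) =====
def Claim_equal_q6_reverse_prime_positions : Prop := ∀ (lst : List Int), Dom_q6_reverse_prime_positions lst → Spec_q6_reverse_prime_positions lst (q6_reverse_prime_positions lst)

-- ===== LEMMAS AND PROOFS =====

-- characterization of the while-loop of B's primality test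
theorem pvTrialB_iff (n i : Nat) :
    pvTrialB n i = true ↔ ∀ j, i ≤ j → j * j ≤ n → ¬ n % j = 0 := by
  induction i using pvTrialB.induct n with
  | case1 i h hz =>
    rw [pvTrialB, if_pos h, if_pos hz]
    simp only [beq_iff_eq] at hz
    constructor
    · intro hfalse; exact absurd hfalse (by simp)
    · intro hall; exact absurd hz (hall i le_rfl h)
  | case2 i h hz ih =>
    rw [pvTrialB, if_pos h, if_neg hz]
    simp only [beq_iff_eq] at hz
    constructor
    · intro ht j hij hjj
      rcases Nat.eq_or_lt_of_le hij with rfl | hlt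
      · exact hz
      · exact (ih.mp ht) j hlt hjj
    · intro hall
      exact ih.mpr (fun j hj hjj => hall j (by omega) hjj)
  | case3 i h =>
    rw [pvTrialB, if_neg h]
    simp only [true_iff]
    intro j hij hjj hmod
    exact h (le_trans (Nat.mul_le_mul hij hij) hjj)

-- the two primality tests agree (hard direction via the least factor of n)
theorem pvIsPrime_eq (n : Nat) : pvIsPrimeA n = pvIsPrimeB n := by
  unfold pvIsPrimeA pvIsPrimeB
  split
  · rfl
  · rename_i h2
    rw [Nat.not_lt] at h2
    rw [Bool.eq_iff_iff, List.all_eq_true, pvTrialB_iff]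
    constructor
    · intro hall j h2j hjj
      have hjlt : j < n := by
        have : 2 * j ≤ j * j := Nat.mul_le_mul_right j h2j
        omega
      have := hall j (by rw [List.mem_range'_1]; omega)
      simpa using this
    · intro hall x hx
      rw [List.mem_range'_1] at hx
      have hx2 : 2 ≤ x := hx.1
      have hxn : x < 2 + (n - 2) := hx.2
      simp only [Bool.not_eq_eq_eq_not, Bool.not_true, beq_eq_false_iff_ne, ne_eq]
      intro hmod
      have hxltn : x < n := by omega
      have hdvd : x ∣ n := Nat.dvd_of_mod_eq_zero hmod
      have hn1 : n ≠ 1 := by omega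
      have hnp : ¬ Nat.Prime n := by
        intro hp
        rcases (Nat.Prime.eq_one_or_self_of_dvd hp x hdvd) with rfl | rfl
        · omega
        · omega
      have hm2 : 2 ≤ n.minFac := (Nat.minFac_prime hn1).two_le
      have hmsq : n.minFac * n.minFac ≤ n := by
        have := Nat.minFac_sq_le_self (by omega) hnp
        simpa [Nat.pow_two] using this
      exact hall n.minFac hm2 hmsq (Nat.mod_eq_zero_of_dvd (Nat.minFac_dvd n))

theorem pv_getD_set_self (l : List Int) (a : Nat) (v : Int) (h : a < l.length) :
    (l.set a v).getD a 0 = v := by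
  simp [List.getD_eq_getElem?_getD, h]

theorem pv_getD_set_ne (l : List Int) (a b : Nat) (v : Int) (h : a ≠ b) :
    (l.set a v).getD b 0 = l.getD b 0 := by
  simp [List.getD_eq_getElem?_getD, List.getElem?_set_ne h]

-- pointwise description of B's write-back loop (scatter at pairwise-distinct positions)
theorem pv_scatter (ps : List Nat) : ∀ (vs l : List Int),
    ps.Nodup → (∀ p ∈ ps, p < l.length) → vs.length = ps.length →
    ((ps.zip vs).foldl (fun l pv => l.set pv.1 pv.2) l).length = l.length ∧
    (∀ j, (hj : j < ps.length) →
      ((ps.zip vs).foldl (fun l pv => l.set pv.1 pv.2) l).getD ps[j] 0 = vs.getD j 0) ∧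
    (∀ q, q ∉ ps → ((ps.zip vs).foldl (fun l pv => l.set pv.1 pv.2) l).getD q 0 = l.getD q 0) := by
  induction ps with
  | nil => intro vs l _ _ _; simp
  | cons p ps ih =>
    intro vs l hnd hlt hlen
    cases vs with
    | nil => simp at hlen
    | cons v vs =>
      simp only [List.zip_cons_cons, List.foldl_cons]
      have hnd' := (List.nodup_cons.mp hnd).2
      have hpmem := (List.nodup_cons.mp hnd).1
      have hplen : p < l.length := hlt p (List.mem_cons_self ..)
      have hlt' : ∀ q ∈ ps, q < (l.set p v).length := by
        intro q hq; rw [List.length_set]; exact hlt q (List.mem_cons_of_mem _ hq)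
      have hlen' : vs.length = ps.length := by simpa using hlen
      obtain ⟨ihlen, ihat, ihout⟩ := ih vs (l.set p v) hnd' hlt' hlen'
      refine ⟨by rw [ihlen, List.length_set], ?_, ?_⟩
      · intro j hj
        cases j with
        | zero =>
          simp only [List.getElem_cons_zero, List.getD_cons_zero]
          rw [ihout p hpmem, pv_getD_set_self l p v hplen]
        | succ j =>
          have hj' : j < ps.length := by simpa using hj
          simpa using ihat j hj'
      · intro q hq
        rw [List.mem_cons, not_or] at hq
        rw [ihout q hq.2, pv_getD_set_ne l p q v (Ne.symm hq.1)]

-- A's swap-loop body, named for the invariant proof (definitionally the port's lambda)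
def pvSwapStep (P : List Nat) (l : List Int) (t : Nat) : List Int :=
  let p := P.getD t 0
  let q := P.getD (P.length - t - 1) 0
  let temp := l.getD p 0
  (l.set p (l.getD q 0)).set q temp

theorem pv_getD_inj (P : List Nat) (hnd : P.Nodup) (a b : Nat)
    (ha : a < P.length) (hb : b < P.length) (h : P.getD a 0 = P.getD b 0) : a = b := by
  rw [List.getD_eq_getElem _ _ ha, List.getD_eq_getElem _ _ hb] at h
  exact (List.Nodup.getElem_inj_iff hnd).mp h

-- invariant of A's swap loop: after i steps the first i and last i prime positions are
-- exchanged, everything else still holds its original value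
theorem pv_swap_loop (P : List Nat) (L : List Int)
    (hnd : P.Nodup) (hlt : ∀ p ∈ P, p < L.length) :
    ∀ i, i ≤ P.length / 2 →
      ((List.range i).foldl (pvSwapStep P) L).length = L.length ∧
      (∀ j, j < P.length →
        ((List.range i).foldl (pvSwapStep P) L).getD (P.getD j 0) 0 =
        (if j < i ∨ P.length - i ≤ j then L.getD (P.getD (P.length - 1 - j) 0) 0
         else L.getD (P.getD j 0) 0)) ∧
      (∀ q, q ∉ P → ((List.range i).foldl (pvSwapStep P) L).getD q 0 = L.getD q 0) := by
  intro i
  induction i with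
  | zero =>
    intro _
    refine ⟨rfl, ?_, fun q _ => rfl⟩
    intro j hj
    simp only [List.range_zero, List.foldl_nil]
    have : ¬ (j < 0 ∨ P.length - 0 ≤ j) := by omega
    rw [if_neg this]
  | succ i ih =>
    intro hi1
    obtain ⟨clen, cat, cout⟩ := ih (by omega)
    set k := P.length with hk
    set C := (List.range i).foldl (pvSwapStep P) L with hC
    have hstep : (List.range (i+1)).foldl (pvSwapStep P) L = pvSwapStep P C i := by
      rw [List.range_succ, List.foldl_append, List.foldl_cons, List.foldl_nil]
    have hik : i < k - 1 - i := by omega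
    have hikk : i < k := by omega
    have hkik : k - i - 1 < k := by omega
    have hne : P.getD i 0 ≠ P.getD (k - i - 1) 0 := by
      intro h; have := pv_getD_inj P hnd i (k - i - 1) hikk hkik h; omega
    have hmemp : P.getD i 0 ∈ P := by
      rw [List.getD_eq_getElem _ _ hikk]; exact List.getElem_mem _
    have hmemq : P.getD (k - i - 1) 0 ∈ P := by
      rw [List.getD_eq_getElem _ _ hkik]; exact List.getElem_mem _
    have hplen : P.getD i 0 < C.length := by rw [clen]; exact hlt _ hmemp
    have hqlen : P.getD (k - i - 1) 0 < C.length := by rw [clen]; exact hlt _ hmemq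
    have hCp : C.getD (P.getD i 0) 0 = L.getD (P.getD i 0) 0 := by
      have := cat i hikk
      rw [if_neg (by omega)] at this; exact this
    have hCq : C.getD (P.getD (k - i - 1) 0) 0 = L.getD (P.getD (k - i - 1) 0) 0 := by
      have := cat (k - i - 1) hkik
      rw [if_neg (by omega)] at this; exact this
    have hslen : (pvSwapStep P C i).length = C.length := by
      unfold pvSwapStep; simp
    refine ⟨by rw [hstep, hslen, clen], ?_, ?_⟩
    · intro j hj
      rw [hstep]
      unfold pvSwapStep
      simp only [← hk]
      by_cases hji : j = i
      · subst hji
        rw [pv_getD_set_ne _ _ _ _ (Ne.symm hne), pv_getD_set_self _ _ _ hplen]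
        rw [hCq, if_pos (by omega)]
        congr 2
        omega
      · by_cases hjq : j = k - i - 1
        · subst hjq
          rw [pv_getD_set_self _ _ _ (by simpa using hqlen)]
          rw [hCp, if_pos (by omega)]
          congr 2
          omega
        · have hnep : P.getD j 0 ≠ P.getD i 0 := by
            intro h; exact hji (pv_getD_inj P hnd j i hj hikk h)
          have hneq : P.getD j 0 ≠ P.getD (k - i - 1) 0 := by
            intro h; exact hjq (pv_getD_inj P hnd j (k - i - 1) hj hkik h)
          rw [pv_getD_set_ne _ _ _ _ (Ne.symm hneq), pv_getD_set_ne _ _ _ _ (Ne.symm hnep)]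
          rw [cat j hj]
          by_cases hc : j < i ∨ k - i ≤ j
          · rw [if_pos hc, if_pos (by omega)]
          · rw [if_neg hc, if_neg (by omega)]
    · intro q hq
      rw [hstep]
      unfold pvSwapStep
      simp only [← hk]
      have h1 : P.getD (k - i - 1) 0 ≠ q := fun h => hq (h ▸ hmemq)
      have h2 : P.getD i 0 ≠ q := fun h => hq (h ▸ hmemp)
      rw [pv_getD_set_ne _ _ _ _ h1, pv_getD_set_ne _ _ _ _ h2, cout q hq]

-- ===== VERDICT (by name: the statement is the Claim_ definition above) =====
theorem q6_reverse_prime_positions_spec : Claim_equal_q6_reverse_prime_positions := by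
  intro lst _
  unfold Spec_q6_reverse_prime_positions q6_reverse_prime_positions q6_reverse_prime_positions_alt
  simp only
  set n := lst.length with hn
  set P : List Nat := (List.range n).filter pvIsPrimeB with hP
  -- A's first loop builds exactly P
  have hAfilter :
      (List.range n).foldl (fun acc i => if pvIsPrimeA i then acc ++ [i] else acc) ([] : List Nat) = P := by
    rw [PySem.List.foldl_append_if_eq_filter]
    rw [hP]
    simp only [List.nil_append]
    congr 1
    funext x
    exact pvIsPrime_eq x
  rw [hAfilter]
  set k := P.length with hk
  have hnd : P.Nodup := (List.nodup_range).filter _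
  have hlt : ∀ p ∈ P, p < lst.length := by
    intro p hp
    have := List.of_mem_filter hp
    have hm := List.mem_of_mem_filter hp
    rw [List.mem_range] at hm
    exact hm
  -- A's swap loop, pointwise
  have hfun : (fun (l : List Int) (i : Nat) =>
      let p := P.getD i 0
      let q := P.getD (k - i - 1) 0
      let temp := l.getD p 0
      let l1 := l.set p (l.getD q 0)
      l1.set q temp) = pvSwapStep P := rfl
  rw [hfun]
  obtain ⟨alen, aat, aout⟩ := pv_swap_loop P lst hnd hlt (k / 2) le_rfl
  -- B's scatter, pointwise
  set rev : List Int := (P.map (fun p => lst.getD p 0)).reverse with hrev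
  have hrevlen : rev.length = k := by simp [hrev, hk]
  obtain ⟨blen, bat, bout⟩ := pv_scatter P rev lst hnd hlt hrevlen
  -- both sides agree at every position
  apply List.ext_getElem (by rw [alen, blen])
  intro q hq1 hq2
  rw [← List.getD_eq_getElem _ 0 hq1, ← List.getD_eq_getElem _ 0 hq2]
  by_cases hqP : q ∈ P
  · obtain ⟨j, hj, hjq⟩ := List.mem_iff_getElem.mp hqP
    subst hjq
    have hgd : P[j] = P.getD j 0 := (List.getD_eq_getElem _ _ hj).symm
    have bat' := bat j hj
    rw [hgd] at bat'
    rw [hgd, aat j hj, bat']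
    -- resolve A's if, middle element included
    have hrevj : rev.getD j 0 = lst.getD (P.getD (k - 1 - j) 0) 0 := by
      have hjr : j < rev.length := by omega
      rw [List.getD_eq_getElem _ _ hjr]
      simp only [hrev, List.getElem_reverse, List.getElem_map, List.length_map]
      rw [List.getD_eq_getElem _ _ (show k - 1 - j < P.length by omega)]
    rw [hrevj]
    by_cases hc : j < k / 2 ∨ k - k / 2 ≤ j
    · rw [if_pos hc]
    · rw [if_neg hc]
      have : k - 1 - j = j := by omega
      rw [this]
  · rw [aout q hqP, bout q hqP]
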